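-- pv_equiv track=rewrite | github.com/Mariam-Senzia/python-toy-problems | challenge3.py | solution
-- ===== SOURCE A (Python) =====
-- def solution(N):
--     alphabet = 'abcdefghijklmnopqrstuvwxyz'
--     result = ""
--
--     if N % 2 == 0 or N % 3 == 0:
--         for i in range(N):
--             result += alphabet[i % 26]
--     else:
--         for i in range(N):
--             result += alphabet[(i % 25) + 1]
--
--     return result
-- ===== SOURCE B (Python) =====
-- def solution(N):
--     alphabet = 'abcdefghijklmnopqrstuvwxyz'
--     unit = alphabet if N % 2 == 0 or N % 3 == 0 else alphabet[1:]
--     return (unit * (N // len(unit) + 1))[:N]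
-- ===== Notes on version B (the rewrite author's own statement) =====
-- stated objective: idiomatic
-- what changed: Replaces A's char-by-char loop that appends alphabet[i % k] for each i in range(N) with a repeat-and-slice construction: pick the cycle unit per branch and return (unit * (N // len(unit) + 1))[:N].
import Mathlib
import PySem

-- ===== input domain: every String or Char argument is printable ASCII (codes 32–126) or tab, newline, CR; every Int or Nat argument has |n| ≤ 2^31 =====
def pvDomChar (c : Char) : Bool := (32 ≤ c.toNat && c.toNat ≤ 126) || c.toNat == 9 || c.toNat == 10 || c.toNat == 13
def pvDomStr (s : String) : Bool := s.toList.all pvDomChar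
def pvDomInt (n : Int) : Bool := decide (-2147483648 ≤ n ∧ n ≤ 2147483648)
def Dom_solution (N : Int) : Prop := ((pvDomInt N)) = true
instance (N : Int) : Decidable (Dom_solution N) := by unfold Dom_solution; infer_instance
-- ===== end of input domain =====

-- B replaces A's char-by-char index loop with a repeat-and-slice construction of the
-- same cyclic string (unit * (N // len(unit) + 1))[:N]; objective: idiomatic.

-- ===== PORT A =====
-- the loop body's index is always in range (0 ≤ i % 26 < 26, 1 ≤ i % 25 + 1 ≤ 25),
-- so pyGetD's default ' ' is never used and the port is exact
def solution (N : Int) : String :=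
  let alphabet := "abcdefghijklmnopqrstuvwxyz".toList
  let result : List Char :=
    if PySem.Int.mod N 2 == 0 || PySem.Int.mod N 3 == 0 then
      (PySem.List.pyRange 0 N 1).foldl
        (fun res i => res ++ [PySem.List.pyGetD alphabet (PySem.Int.mod i 26) ' ']) []
    else
      (PySem.List.pyRange 0 N 1).foldl
        (fun res i => res ++ [PySem.List.pyGetD alphabet (PySem.Int.mod i 25 + 1) ' ']) []
  String.ofList result

-- ===== PORT B =====
def solution_alt (N : Int) : String :=
  let alphabet := "abcdefghijklmnopqrstuvwxyz".toList
  let unit : List Char :=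
    if PySem.Int.mod N 2 == 0 || PySem.Int.mod N 3 == 0 then alphabet
    else PySem.List.slice alphabet (some 1) none
  String.ofList (PySem.List.slice
    (PySem.List.pyRepeat unit (PySem.Int.floordiv N (unit.length : Int) + 1))
    none (some N))

-- ===== PRECONDITION & SPEC =====
def Spec_solution (N : Int) (out : String) : Prop := out = solution_alt N
instance (N : Int) (out : String) : Decidable (Spec_solution N out) := by unfold Spec_solution; infer_instance

-- ===== CLAIM (what is proved, stated in full; the proofs are below) =====
def Claim_equal_solution : Prop := ∀ (N : Int), Dom_solution N → Spec_solution N (solution N)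

-- ===== LEMMAS AND PROOFS =====

-- a prefix of a unit is the matching map over the range
lemma map_range_getD_of_le {u : List Char} {d : Char} {n : Nat} (h : n ≤ u.length) :
    (List.range n).map (fun i => u.getD (i % u.length) d) = u.take n := by
  apply List.ext_getElem
  · simp [h]
  · intro i hi hj
    have hiu : i < u.length := lt_of_lt_of_le (by simpa using hi) h
    simp [List.getD_eq_getElem?_getD, Nat.mod_eq_of_lt hiu, List.getElem?_eq_getElem hiu]

-- the cyclic map over range n is the n-prefix of the unit repeated m times, once n ≤ m·|u|
lemma map_range_cycle (u : List Char) (d : Char) (hu : u ≠ []) :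
    ∀ (m n : Nat), n ≤ m * u.length →
      (List.range n).map (fun i => u.getD (i % u.length) d)
        = ((List.replicate m u).flatten).take n := by
  intro m
  induction m with
  | zero =>
      intro n hn
      have : n = 0 := by omega
      subst this; simp
  | succ m ih =>
      intro n hn
      have hL : 0 < u.length := List.length_pos_iff.mpr hu
      rw [List.replicate_succ, List.flatten_cons]
      by_cases hsmall : n ≤ u.length
      · rw [List.take_append_of_le_length hsmall, map_range_getD_of_le hsmall]
      · rw [not_le] at hsmall
        have hdecomp : n = u.length + (n - u.length) := by omega
        have hr : (List.range n).map (fun i => u.getD (i % u.length) d)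
            = u ++ (List.range (n - u.length)).map (fun i => u.getD (i % u.length) d) := by
          conv_lhs => rw [hdecomp]
          rw [List.range_add, List.map_append, List.map_map]
          congr 1
          · simpa using map_range_getD_of_le (d := d) (le_refl u.length)
          · apply List.map_congr_left
            intro i _
            simp [Function.comp, Nat.add_mod_left]
        have hle' : n - u.length ≤ m * u.length := by
          have := hn; rw [Nat.succ_mul] at this; omega
        rw [hr, ih (n - u.length) hle', List.take_append,
            List.take_of_length_le (le_of_lt hsmall)]

-- one branch of the equivalence: A's append loop vs B's repeat-and-slice,
-- for a non-empty unit u whose cyclic indexing matches the loop body f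
lemma branch_eq (u : List Char) (hu : u ≠ []) (N : Int)
    (f : Int → Char) (hf : ∀ i : Nat, f (i : Int) = u.getD (i % u.length) ' ') :
    (PySem.List.pyRange 0 N 1).foldl (fun res i => res ++ [f i]) []
      = PySem.List.slice
          (PySem.List.pyRepeat u (PySem.Int.floordiv N (u.length : Int) + 1))
          none (some N) := by
  have hL : 0 < u.length := List.length_pos_iff.mpr hu
  rw [PySem.List.foldl_append_singleton_eq_map, List.nil_append]
  by_cases hN : 0 ≤ N
  · -- N = ↑n: both sides are the first n characters of the cycle
    obtain ⟨n, rfl⟩ : ∃ n : Nat, N = (n : Int) := ⟨N.toNat, (Int.toNat_of_nonneg hN).symm⟩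
    rw [PySem.List.pyRange_zero_natCast, List.map_map,
        PySem.Int.floordiv_natCast n u.length]
    have hcast : ((n / u.length : Nat) : Int) + 1 = ((n / u.length + 1 : Nat) : Int) := by
      push_cast; ring
    rw [hcast]
    have hrep : PySem.List.pyRepeat u ((n / u.length + 1 : Nat) : Int)
        = (List.replicate (n / u.length + 1) u).flatten := by
      unfold PySem.List.pyRepeat
      rw [Int.toNat_natCast]
    rw [hrep, PySem.List.slice_to _ (by exact_mod_cast Nat.zero_le n), Int.toNat_natCast]
    have hle : n ≤ (n / u.length + 1) * u.length := by
      have h1 := Nat.div_add_mod n u.length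
      have h2 := Nat.mod_lt n hL
      have h3 : (n / u.length + 1) * u.length = u.length * (n / u.length) + u.length := by
        ring
      omega
    rw [← map_range_cycle u ' ' hu (n / u.length + 1) n hle]
    apply List.map_congr_left
    intro i _
    simpa using hf i
  · -- N < 0: both sides are empty
    rw [not_le] at hN
    have hrange : PySem.List.pyRange 0 N 1 = [] := by
      simp [PySem.List.pyRange]
      omega
    have hmul : PySem.Int.floordiv N (u.length : Int) + 1 ≤ 0 := by
      have : PySem.Int.floordiv N (u.length : Int) < 0 :=
        (PySem.Int.floordiv_lt_iff_lt_mul (by exact_mod_cast hL)).mpr (by simpa using hN)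
      omega
    have hrep : PySem.List.pyRepeat u (PySem.Int.floordiv N (u.length : Int) + 1) = [] := by
      have h0 : (PySem.Int.floordiv N (u.length : Int) + 1).toNat = 0 := by omega
      unfold PySem.List.pyRepeat
      rw [h0]
      simp
    rw [hrange, hrep]
    simp [PySem.List.slice]

-- ===== VERDICT (by name: the statement is the Claim_ definition above) =====
theorem solution_spec : Claim_equal_solution := by
  intro N _
  unfold Spec_solution solution solution_alt
  by_cases h : (PySem.Int.mod N 2 == 0 || PySem.Int.mod N 3 == 0) = true
  · simp only [h, if_true]
    congr 1
    exact branch_eq "abcdefghijklmnopqrstuvwxyz".toList (by decide) N _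
      (fun i => by
        have h26 : (26 : Int) = ((26 : Nat) : Int) := by norm_num
        rw [h26, PySem.Int.mod_natCast, PySem.List.pyGetD_natCast,
            show ("abcdefghijklmnopqrstuvwxyz".toList).length = 26 from by decide])
  · rw [Bool.not_eq_true] at h
    simp only [h, Bool.false_eq_true, if_false]
    congr 1
    rw [show PySem.List.slice "abcdefghijklmnopqrstuvwxyz".toList (some 1) none
        = "bcdefghijklmnopqrstuvwxyz".toList from by decide]
    exact branch_eq "bcdefghijklmnopqrstuvwxyz".toList (by decide) N _
      (fun i => by
        have h1 : PySem.Int.mod (i : Int) 25 + 1 = ((i % 25 + 1 : Nat) : Int) := by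
          rw [show (25 : Int) = ((25 : Nat) : Int) from by norm_num,
              PySem.Int.mod_natCast]
          push_cast; ring
        rw [h1, PySem.List.pyGetD_natCast,
            show ("bcdefghijklmnopqrstuvwxyz".toList).length = 25 from by decide]
        have hlt : i % 25 < 25 := Nat.mod_lt i (by norm_num)
        -- the two literal alphabets agree shifted by one position
        have key : ∀ j : Fin 25, ("abcdefghijklmnopqrstuvwxyz".toList).getD (j.val + 1) ' '
            = ("bcdefghijklmnopqrstuvwxyz".toList).getD j.val ' ' := by decide
        exact key ⟨i % 25, hlt⟩)
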